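-- pv_equiv track=rewrite | github.com/44r0nqtp2t43vr/FreeAI | modules/validators.py | validate_L1_20
-- ===== SOURCE A (Python) =====
-- def validate_L1_20(statement_type, tags_list):
--     equals_indices = [index for index in range(len(tags_list)) if tags_list[index][1] == '=']
--     varname_indices = [index for index in range(len(tags_list)) if tags_list[index][1] == 'var_name']
--     number_indices = [index for index in range(len(tags_list)) if tags_list[index][1] == 'number']
--     function_indices = [index for index in range(len(tags_list)) if tags_list[index][1] == 'function_name']
--     if statement_type == 'loop' and (len(equals_indices) == 2 and (len(varname_indices) == 1 and (len(number_indices) == 1 and len(function_indices) == 1))):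
--         if tags_list[0][1] == 'do' and (equals_indices[1] - equals_indices[0] == 1 and tags_list[number_indices[0]][0] == '0'):
--             if tags_list[varname_indices[0]][0] == 'hasnoright' and tags_list[function_indices[0]][0] == 'goright':
--                 return True
--             elif tags_list[varname_indices[0]][0] == 'hasnoleft' and tags_list[function_indices[0]][0] == 'goleft':
--                 return True
--             elif tags_list[varname_indices[0]][0] == 'hasnoup' and tags_list[function_indices[0]][0] == 'goup':
--                 return True
--             elif tags_list[varname_indices[0]][0] == 'hasnodown' and tags_list[function_indices[0]][0] == 'godown':
--                 return True
--     return False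
-- ===== SOURCE B (Python) =====
-- def validate_L1_20(statement_type, tags_list):
--     # One streaming pass keeping a summary (counters, last seen values, previous
--     # tag for '=' adjacency) instead of building index lists and re-indexing.
--     first_tag = tags_list[0][1] if tags_list else None
--     prev_tag = None
--     cnt_eq = 0
--     adj_eq = False
--     cnt_var = 0
--     cnt_num = 0
--     cnt_fun = 0
--     var_val = None
--     num_val = None
--     fun_val = None
--     for value, tag in tags_list:
--         if tag == '=':
--             cnt_eq += 1
--             if prev_tag == '=':
--                 adj_eq = True
--         elif tag == 'var_name':
--             cnt_var += 1
--             var_val = value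
--         elif tag == 'number':
--             cnt_num += 1
--             num_val = value
--         elif tag == 'function_name':
--             cnt_fun += 1
--             fun_val = value
--         prev_tag = tag
--     return (statement_type == 'loop' and cnt_eq == 2 and adj_eq
--             and cnt_var == 1 and cnt_num == 1 and cnt_fun == 1
--             and first_tag == 'do' and num_val == '0'
--             and (var_val, fun_val) in {('hasnoright', 'goright'), ('hasnoleft', 'goleft'),
--                                        ('hasnoup', 'goup'), ('hasnodown', 'godown')})
-- ===== Notes on version B (the rewrite author's own statement) =====
-- stated objective: alternative
-- what changed: Instead of building four index lists and re-indexing tags_list, B streams the list once keeping only a constant-size summary (per-tag counters, the last seen value of each tag, and the previous tag to detect two adjacent '=' tokens), then tests the summary, replacing the index-difference check by on-the-fly adjacency detection and the elif chain by pair-set membership.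
import Mathlib
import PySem

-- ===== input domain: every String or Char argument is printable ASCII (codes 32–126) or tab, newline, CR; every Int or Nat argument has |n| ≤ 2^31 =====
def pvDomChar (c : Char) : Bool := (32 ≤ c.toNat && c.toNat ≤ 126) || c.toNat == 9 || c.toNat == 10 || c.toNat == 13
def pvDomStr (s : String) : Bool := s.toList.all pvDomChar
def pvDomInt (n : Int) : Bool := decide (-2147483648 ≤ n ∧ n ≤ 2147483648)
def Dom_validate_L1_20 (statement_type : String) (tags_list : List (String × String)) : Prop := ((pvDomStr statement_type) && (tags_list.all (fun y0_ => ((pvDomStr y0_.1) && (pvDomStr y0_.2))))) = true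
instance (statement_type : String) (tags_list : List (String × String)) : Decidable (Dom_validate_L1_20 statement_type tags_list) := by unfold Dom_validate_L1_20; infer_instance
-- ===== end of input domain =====

-- B replaces A's four index lists + re-indexing by ONE streaming pass keeping a
-- constant-size summary (counters, last value per tag, previous tag for '='
-- adjacency) and a final pair-set membership test (objective: alternative).

-- ===== PORT A =====
def validate_L1_20 (statement_type : String) (tags_list : List (String × String)) : Bool :=
  let equals_indices := (PySem.List.pyRange 0 (PySem.List.len tags_list) 1).filter
      (fun index => (PySem.List.pyGetD tags_list index ("", "")).2 == "=")
  let varname_indices := (PySem.List.pyRange 0 (PySem.List.len tags_list) 1).filter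
      (fun index => (PySem.List.pyGetD tags_list index ("", "")).2 == "var_name")
  let number_indices := (PySem.List.pyRange 0 (PySem.List.len tags_list) 1).filter
      (fun index => (PySem.List.pyGetD tags_list index ("", "")).2 == "number")
  let function_indices := (PySem.List.pyRange 0 (PySem.List.len tags_list) 1).filter
      (fun index => (PySem.List.pyGetD tags_list index ("", "")).2 == "function_name")
  if statement_type == "loop" && (equals_indices.length == 2 && (varname_indices.length == 1 && (number_indices.length == 1 && function_indices.length == 1))) then
    if (PySem.List.pyGetD tags_list 0 ("", "")).2 == "do" && (PySem.List.pyGetD equals_indices 1 0 - PySem.List.pyGetD equals_indices 0 0 == 1 && (PySem.List.pyGetD tags_list (PySem.List.pyGetD number_indices 0 0) ("", "")).1 == "0") then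
      if (PySem.List.pyGetD tags_list (PySem.List.pyGetD varname_indices 0 0) ("", "")).1 == "hasnoright" && (PySem.List.pyGetD tags_list (PySem.List.pyGetD function_indices 0 0) ("", "")).1 == "goright" then
        true
      else if (PySem.List.pyGetD tags_list (PySem.List.pyGetD varname_indices 0 0) ("", "")).1 == "hasnoleft" && (PySem.List.pyGetD tags_list (PySem.List.pyGetD function_indices 0 0) ("", "")).1 == "goleft" then
        true
      else if (PySem.List.pyGetD tags_list (PySem.List.pyGetD varname_indices 0 0) ("", "")).1 == "hasnoup" && (PySem.List.pyGetD tags_list (PySem.List.pyGetD function_indices 0 0) ("", "")).1 == "goup" then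
        true
      else if (PySem.List.pyGetD tags_list (PySem.List.pyGetD varname_indices 0 0) ("", "")).1 == "hasnodown" && (PySem.List.pyGetD tags_list (PySem.List.pyGetD function_indices 0 0) ("", "")).1 == "godown" then
        true
      else false
    else false
  else false

-- ===== PORT B =====
-- Source B's loop state: counters, last seen value per tag (None → Option), the
-- previous tag ('prev_tag') used to detect two adjacent '=' tokens.
structure PVSum where
  cntEq : Int
  adjEq : Bool
  cntVar : Int
  varVal : Option String
  cntNum : Int
  numVal : Option String
  cntFun : Int
  funVal : Option String
  prevTag : Option String
deriving Repr, DecidableEq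

-- the loop body of Source B (the if/elif dispatch, then 'prev_tag = tag')
def pvStep (s : PVSum) (p : String × String) : PVSum :=
  let s' :=
    if p.2 == "=" then
      { s with cntEq := s.cntEq + 1, adjEq := if s.prevTag == some "=" then true else s.adjEq }
    else if p.2 == "var_name" then { s with cntVar := s.cntVar + 1, varVal := some p.1 }
    else if p.2 == "number" then { s with cntNum := s.cntNum + 1, numVal := some p.1 }
    else if p.2 == "function_name" then { s with cntFun := s.cntFun + 1, funVal := some p.1 }
    else s
  { s' with prevTag := some p.2 }

def validate_L1_20_alt (statement_type : String) (tags_list : List (String × String)) : Bool :=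
  let firstTag : Option String := match tags_list with | [] => none | p :: _ => some p.2
  let s := tags_list.foldl pvStep ⟨0, false, 0, none, 0, none, 0, none, none⟩
  statement_type == "loop" && s.cntEq == 2 && s.adjEq
    && s.cntVar == 1 && s.cntNum == 1 && s.cntFun == 1
    && firstTag == some "do" && s.numVal == some "0"
    && [(some "hasnoright", some "goright"), (some "hasnoleft", some "goleft"),
        (some "hasnoup", some "goup"), (some "hasnodown", some "godown")].contains (s.varVal, s.funVal)

-- ===== PRECONDITION & SPEC =====
def Spec_validate_L1_20 (statement_type : String) (tags_list : List (String × String)) (out : Bool) : Prop := out = validate_L1_20_alt statement_type tags_list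
instance (statement_type : String) (tags_list : List (String × String)) (out : Bool) : Decidable (Spec_validate_L1_20 statement_type tags_list out) := by unfold Spec_validate_L1_20; infer_instance

-- ===== CLAIM (what is proved, stated in full; the proofs are below) =====
def Claim_equal_validate_L1_20 : Prop := ∀ (statement_type : String) (tags_list : List (String × String)), Dom_validate_L1_20 statement_type tags_list → Spec_validate_L1_20 statement_type tags_list (validate_L1_20 statement_type tags_list)

-- ===== LEMMAS AND PROOFS =====

-- spec functions the fold is characterized by
def pvFilt (t : String) (tl : List (String × String)) : List (String × String) :=
  tl.filter (fun p => p.2 == t)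

def pvAdjSpec : Option String → List (String × String) → Bool
  | _, [] => false
  | prev, p :: r => (p.2 == "=" && prev == some "=") || pvAdjSpec (some p.2) r

def pvLastSpec (t : String) : List (String × String) → Option String → Option String
  | [], d => d
  | p :: r, d => pvLastSpec t r (if p.2 == t then some p.1 else d)

def pvPrevSpec : List (String × String) → Option String → Option String
  | [], d => d
  | p :: r, _ => pvPrevSpec r (some p.2)

theorem pv_beqd (o : Option String) (x : String) : (o == some x) = decide (o = some x) :=
  Bool.beq_eq_decide_eq o (some x)

theorem pv_fold_char (tl : List (String × String)) (s : PVSum) :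
    tl.foldl pvStep s =
      ⟨s.cntEq + (pvFilt "=" tl).length, s.adjEq || pvAdjSpec s.prevTag tl,
       s.cntVar + (pvFilt "var_name" tl).length, pvLastSpec "var_name" tl s.varVal,
       s.cntNum + (pvFilt "number" tl).length, pvLastSpec "number" tl s.numVal,
       s.cntFun + (pvFilt "function_name" tl).length, pvLastSpec "function_name" tl s.funVal,
       pvPrevSpec tl s.prevTag⟩ := by
  induction tl generalizing s with
  | nil => cases s; simp [pvFilt, pvAdjSpec, pvLastSpec, pvPrevSpec]
  | cons p r ih =>
    obtain ⟨v, t⟩ := p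
    rw [List.foldl_cons, ih]
    have hbool : ∀ (c b x : Bool), ((if c then true else b) || x) = (b || ((true && c) || x)) := by
      intro c b x; cases c <;> cases b <;> cases x <;> rfl
    by_cases h1 : t = "="
    · subst h1
      simp only [pvStep, PVSum.mk.injEq]
      refine ⟨by simp [pvFilt]; try ring, ?_, ?_, ?_, ?_, ?_, ?_, ?_, ?_⟩ <;>
        simp [pvFilt, pvAdjSpec, pvLastSpec, pvPrevSpec, pv_beqd, Bool.or_comm,
          Bool.or_left_comm]
    · by_cases h2 : t = "var_name"
      · subst h2
        simp only [pvStep, PVSum.mk.injEq]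
        refine ⟨?_, ?_, by simp [pvFilt]; try ring, ?_, ?_, ?_, ?_, ?_, ?_⟩ <;>
          simp [pvFilt, pvAdjSpec, pvLastSpec, pvPrevSpec]
      · by_cases h3 : t = "number"
        · subst h3
          simp only [pvStep, PVSum.mk.injEq]
          refine ⟨?_, ?_, ?_, ?_, by simp [pvFilt]; try ring, ?_, ?_, ?_, ?_⟩ <;>
            simp [pvFilt, pvAdjSpec, pvLastSpec, pvPrevSpec]
        · by_cases h4 : t = "function_name"
          · subst h4
            simp only [pvStep, PVSum.mk.injEq]
            refine ⟨?_, ?_, ?_, ?_, ?_, ?_, by simp [pvFilt]; try ring, ?_, ?_⟩ <;>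
              simp [pvFilt, pvAdjSpec, pvLastSpec, pvPrevSpec]
          · have e1 : (t == "=") = false := by simp [h1]
            have e2 : (t == "var_name") = false := by simp [h2]
            have e3 : (t == "number") = false := by simp [h3]
            have e4 : (t == "function_name") = false := by simp [h4]
            simp [pvStep, pvFilt, pvAdjSpec, pvLastSpec, pvPrevSpec, e1, e2, e3, e4]

-- the tagged sub-list of enumerate(tl, k)
def pvF (t : String) (tl : List (String × String)) (k : Int) : List (Int × (String × String)) :=
  (PySem.List.enumerate tl k).filter (fun q => q.2.2 == t)

-- A's index comprehension is the first projection of pvF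
theorem pv_A_idx (tl : List (String × String)) (t : String) :
    (PySem.List.pyRange 0 (PySem.List.len tl) 1).filter
        (fun index => (PySem.List.pyGetD tl index ("", "")).2 == t)
      = (pvF t tl 0).map (·.1) := by
  rw [pvF, PySem.List.enumerate_eq_map_pyRange tl ("", ""), List.filter_map, List.map_map]
  simp only [Function.comp_def]
  simp

theorem pv_F_snd (t : String) (tl : List (String × String)) (k : Int) :
    (pvF t tl k).map (·.2) = pvFilt t tl := by
  rw [pvF, pvFilt]
  conv_rhs => rw [← PySem.List.map_snd_enumerate tl k, List.filter_map]
  rfl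

theorem pv_F_get (t : String) (tl : List (String × String)) (q : Int × (String × String))
    (hq : q ∈ pvF t tl 0) : PySem.List.pyGetD tl q.1 ("", "") = q.2 := by
  have hmem : q ∈ PySem.List.enumerate tl 0 := (List.mem_filter.mp hq).1
  obtain ⟨j, hj, rfl⟩ := (PySem.List.mem_enumerate_iff _ _ _).mp hmem
  simp [List.getD_eq_getElem?_getD, hj]

theorem pv_F_fst_ge (t : String) (tl : List (String × String)) (k : Int)
    (q : Int × (String × String)) (hq : q ∈ pvF t tl k) : k ≤ q.1 := by
  have hmem : q ∈ PySem.List.enumerate tl k := (List.mem_filter.mp hq).1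
  obtain ⟨j, hj, rfl⟩ := (PySem.List.mem_enumerate_iff _ _ _).mp hmem
  simp

def pvHasAdj : List Int → Bool
  | a :: b :: r => (b - a == 1) || pvHasAdj (b :: r)
  | _ => false

theorem pv_adj_char (tl : List (String × String)) (k : Int) (prev : Option String) :
    pvAdjSpec prev tl
      = pvHasAdj ((if prev == some "=" then [k - 1] else []) ++ (pvF "=" tl k).map (·.1)) := by
  induction tl generalizing k prev with
  | nil =>
    cases hp : prev == some "=" <;> simp [pvAdjSpec, pvF, PySem.List.enumerate_nil, pvHasAdj]
  | cons p r ih =>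
    have hF : pvF "=" (p :: r) k
        = if p.2 == "=" then (k, p) :: pvF "=" r (k + 1) else pvF "=" r (k + 1) := by
      rw [pvF, PySem.List.enumerate_cons]
      by_cases h : p.2 = "=" <;> simp [pvF, h]
    by_cases h : p.2 = "="
    · rw [hF]
      simp only [h, beq_self_eq_true, if_true]
      by_cases hp : prev = some "="
      · have : (k : Int) - (k - 1) == 1 := by simp
        simp [pvAdjSpec, h, hp, pvHasAdj]
      · have hbe : (prev == some "=") = false := by simp [hp]
        have := ih (k + 1) (some "=")
        simp only [show (some "=" == some "=") = true from rfl, if_true] at this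
        have hk : (k + 1 - 1 : Int) = k := by ring
        rw [hk] at this
        simp [pvAdjSpec, h, hbe, this]
    · rw [hF]
      have hbe : (p.2 == "=") = false := by simp [h]
      simp only [hbe, Bool.false_eq_true, if_false]
      have hrec := ih (k + 1) (some p.2)
      have hne : (some p.2 == some "=") = false := by simp [h]
      rw [hne] at hrec
      simp only [Bool.false_eq_true, if_false, List.nil_append] at hrec
      have lhs : pvAdjSpec prev (p :: r) = pvAdjSpec (some p.2) r := by
        simp [pvAdjSpec, hbe]
      rw [lhs, hrec]
      cases hp : prev == some "=" <;> simp [hp]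
      cases hrest : (pvF "=" r (k + 1)).map (·.1) with
      | nil => simp [pvHasAdj]
      | cons a r' =>
        have ha : k + 1 ≤ a := by
          have : a ∈ (pvF "=" r (k + 1)).map (·.1) := by rw [hrest]; exact List.mem_cons_self
          obtain ⟨q, hq, rfl⟩ := List.mem_map.mp this
          exact pv_F_fst_ge _ _ _ _ hq
        have : (a - (k - 1) == 1) = false := by simp; omega
        simp [pvHasAdj, this]

theorem pv_last_nil (t : String) (l : List (String × String)) (hl : pvFilt t l = []) :
    ∀ d : Option String, pvLastSpec t l d = d := by
  induction l with
  | nil => intro d; simp [pvLastSpec]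
  | cons a b ihb =>
    intro d
    have ha : ¬ (a.2 = t) := by
      intro hh
      simp [pvFilt, hh] at hl
    have hb : pvFilt t b = [] := by
      simpa [pvFilt, List.filter_cons, ha] using hl
    simp [pvLastSpec, ha, ihb hb]

theorem pv_last_singleton (t : String) (tl : List (String × String)) :
    ∀ (d : Option String) (p : String × String), pvFilt t tl = [p] → pvLastSpec t tl d = some p.1 := by
  induction tl with
  | nil => intro d p h; simp [pvFilt] at h
  | cons q r ih =>
    intro d p h
    by_cases hq : q.2 = t
    · have hc : pvFilt t (q :: r) = q :: pvFilt t r := by simp [pvFilt, hq]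
      rw [hc] at h
      obtain ⟨h1, h2⟩ := List.cons_eq_cons.mp h
      subst h1
      simp [pvLastSpec, hq, pv_last_nil t r h2]
    · have hc : pvFilt t (q :: r) = pvFilt t r := by simp [pvFilt, hq]
      rw [hc] at h
      simp [pvLastSpec, hq, ih _ _ h]

-- count bridge between B's Int counters and A's Nat lengths
theorem pv_cast2 (n : Nat) : ((n : Int) == 2) = (n == 2) := by
  rw [Bool.eq_iff_iff]; simp; try omega

theorem pv_cast1 (n : Nat) : ((n : Int) == 1) = (n == 1) := by
  rw [Bool.eq_iff_iff]; simp; try omega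

-- the pair table equals A's four-way chain (as Bools, on the unique values)
theorem pv_tail (a b : String) :
    ([(some "hasnoright", some "goright"), (some "hasnoleft", some "goleft"),
      (some "hasnoup", some "goup"), (some "hasnodown", some "godown")].contains
        ((some a : Option String), (some b : Option String)))
      = (if a == "hasnoright" && b == "goright" then true
         else if a == "hasnoleft" && b == "goleft" then true
         else if a == "hasnoup" && b == "goup" then true
         else if a == "hasnodown" && b == "godown" then true
         else false) := by
  simp only [List.contains_cons, List.contains_nil, Bool.or_false]
  cases h1 : a == "hasnoright" <;> cases h2 : a == "hasnoleft" <;> cases h3 : a == "hasnoup" <;>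
    cases h4 : a == "hasnodown" <;>
    simp_all [Prod.ext_iff, beq_iff_eq] <;>
    cases hb1 : b == "goright" <;> cases hb2 : b == "goleft" <;> cases hb3 : b == "goup" <;>
    cases hb4 : b == "godown" <;> simp_all [beq_iff_eq]

-- ===== VERDICT (by name: the statement is the Claim_ definition above) =====
theorem validate_L1_20_spec : Claim_equal_validate_L1_20 := by
  intro st tl _
  unfold Spec_validate_L1_20
  simp only [validate_L1_20, validate_L1_20_alt]
  rw [pv_fold_char]
  simp only [
    zero_add, Bool.false_or]
  rw [pv_A_idx tl "=", pv_A_idx tl "var_name", pv_A_idx tl "number", pv_A_idx tl "function_name"]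
  simp only [List.length_map]
  have L : ∀ t : String, (pvFilt t tl).length = (pvF t tl 0).length := by
    intro t; rw [← pv_F_snd t tl 0, List.length_map]
  rw [L "=", L "var_name", L "number", L "function_name", pv_cast2, pv_cast1, pv_cast1, pv_cast1]
  cases tl with
  | nil => simp [pvF, PySem.List.enumerate_nil]
  | cons p r =>
    by_cases h1 : (pvF "=" (p :: r) 0).length = 2
    case neg => simp [h1]
    by_cases h2 : (pvF "var_name" (p :: r) 0).length = 1
    case neg => simp [h2]
    by_cases h3 : (pvF "number" (p :: r) 0).length = 1
    case neg => simp [h3]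
    by_cases h4 : (pvF "function_name" (p :: r) 0).length = 1
    case neg => simp [h4]
    obtain ⟨q1, q2, hE⟩ := List.length_eq_two.mp h1
    obtain ⟨qv, hV⟩ := List.length_eq_one_iff.mp h2
    obtain ⟨qn, hN⟩ := List.length_eq_one_iff.mp h3
    obtain ⟨qf, hFn⟩ := List.length_eq_one_iff.mp h4
    have hgv : PySem.List.pyGetD (p :: r) qv.1 ("", "") = qv.2 :=
      pv_F_get _ _ _ (by rw [hV]; exact List.mem_singleton_self qv)
    have hgn : PySem.List.pyGetD (p :: r) qn.1 ("", "") = qn.2 :=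
      pv_F_get _ _ _ (by rw [hN]; exact List.mem_singleton_self qn)
    have hgf : PySem.List.pyGetD (p :: r) qf.1 ("", "") = qf.2 :=
      pv_F_get _ _ _ (by rw [hFn]; exact List.mem_singleton_self qf)
    have hFiltV : pvFilt "var_name" (p :: r) = [qv.2] := by
      rw [← pv_F_snd "var_name" (p :: r) 0, hV]; rfl
    have hFiltN : pvFilt "number" (p :: r) = [qn.2] := by
      rw [← pv_F_snd "number" (p :: r) 0, hN]; rfl
    have hFiltF : pvFilt "function_name" (p :: r) = [qf.2] := by
      rw [← pv_F_snd "function_name" (p :: r) 0, hFn]; rfl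
    rw [pv_last_singleton "var_name" (p :: r) none qv.2 hFiltV,
        pv_last_singleton "number" (p :: r) none qn.2 hFiltN,
        pv_last_singleton "function_name" (p :: r) none qf.2 hFiltF,
        pv_adj_char (p :: r) 0 none, pv_tail, hE, hV, hN, hFn]
    simp only [List.map_cons, List.map_nil, List.nil_append, show ((none : Option String) == some "=") = false from rfl,
      Bool.false_eq_true, if_false, pvHasAdj, Bool.or_false,
      PySem.List.pyGetD_zero_cons, hgv, hgn, hgf]
    have eg : PySem.List.pyGetD [q1.1, q2.1] 1 0 = q2.1 := by
      simp [PySem.List.pyGetD, PySem.List.pyGet?, PySem.List.pyIdx?]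
    rw [eg]
    simp only [show ([q1, q2].length == 2) = true from rfl, show ([qv].length == 1) = true from rfl,
      show ([qn].length == 1) = true from rfl, show ([qf].length == 1) = true from rfl,
      show ∀ (a b : String), (some a == some b) = (a == b) from fun _ _ => rfl,
      Bool.and_true]
    cases hst : (st == "loop") <;>
      simp only [Bool.false_and, Bool.true_and, Bool.false_eq_true, if_false]
    cases hdo : (p.2 == "do") <;> cases hdiff : (q2.1 - q1.1 == 1) <;> cases hnum : (qn.2.1 == "0") <;>
      simp [hdiff]
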